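-- pv_equiv track=rewrite | github.com/Luolingwei/LeetCode | DynamicProgramming/Q1504_Count Submatrices With All Ones.py | count_1D
-- ===== SOURCE A (Python) =====
-- def count_1D(nums):
--     l, total = 0, 0
--     for n in nums:
--         if n:
--             l += 1
--         else:
--             l = 0
--         total += l
--     return total
-- ===== SOURCE B (Python) =====
-- def count_1D(nums):
--     total, run = 0, 0
--     for n in nums:
--         if n:
--             run += 1
--         else:
--             total += run * (run + 1) // 2
--             run = 0
--     total += run * (run + 1) // 2
--     return total
-- ===== Notes on version B (the rewrite author's own statement) =====
-- stated objective: alternative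
-- what changed: Instead of adding the running prefix count on every element, B accumulates each maximal run's contribution at once via the triangular-number closed form k*(k+1)//2 when the run ends (and once after the loop).
import Mathlib
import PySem

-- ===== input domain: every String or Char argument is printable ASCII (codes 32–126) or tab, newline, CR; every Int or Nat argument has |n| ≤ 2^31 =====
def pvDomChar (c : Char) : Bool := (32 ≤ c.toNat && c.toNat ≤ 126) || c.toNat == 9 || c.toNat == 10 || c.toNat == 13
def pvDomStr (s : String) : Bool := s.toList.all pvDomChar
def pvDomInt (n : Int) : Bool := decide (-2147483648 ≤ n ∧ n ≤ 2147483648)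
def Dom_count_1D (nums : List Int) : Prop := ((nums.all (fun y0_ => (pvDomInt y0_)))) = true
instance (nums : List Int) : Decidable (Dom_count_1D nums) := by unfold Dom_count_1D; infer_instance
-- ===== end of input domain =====

-- B replaces the per-element running-count addition by the triangular-number closed form per maximal run (alternative decomposition, same cost).

-- ===== PORT A =====
-- state is (l, total); each element either extends the run counter l or resets it, then total += l
def count_1D (nums : List Int) : Int :=
  (nums.foldl (fun (st : Int × Int) n =>
      let l := if n ≠ 0 then st.1 + 1 else 0
      (l, st.2 + l)) (0, 0)).2

-- ===== PORT B =====
-- flush a just-ended run of length `run` with run*(run+1)//2; final flush after the loop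
def count_1D_altGo (nums : List Int) (total run : Int) : Int :=
  match nums with
  | [] => total + PySem.Int.floordiv (run * (run + 1)) 2
  | n :: rest =>
      if n ≠ 0 then count_1D_altGo rest total (run + 1)
      else count_1D_altGo rest (total + PySem.Int.floordiv (run * (run + 1)) 2) 0

def count_1D_alt (nums : List Int) : Int := count_1D_altGo nums 0 0

-- ===== PRECONDITION & SPEC =====
def Spec_count_1D (nums : List Int) (out : Int) : Prop := out = count_1D_alt nums
instance (nums : List Int) (out : Int) : Decidable (Spec_count_1D nums out) := by unfold Spec_count_1D; infer_instance

-- ===== CLAIM (what is proved, stated in full; the proofs are below) =====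
def Claim_equal_count_1D : Prop := ∀ (nums : List Int), Dom_count_1D nums → Spec_count_1D nums (count_1D nums)

-- ===== LEMMAS AND PROOFS =====

-- triangular number as B computes it
def pvTri (k : Int) : Int := PySem.Int.floordiv (k * (k + 1)) 2

theorem pvTri_zero : pvTri 0 = 0 := by decide

theorem pvTri_succ (l : Int) : pvTri (l + 1) = pvTri l + (l + 1) := by
  unfold pvTri
  rcases Int.even_mul_succ_self l with ⟨m, hm⟩
  have h1 : l * (l + 1) = 2 * m := by omega
  have h2 : (l + 1) * (l + 1 + 1) = 2 * (m + (l + 1)) := by ring_nf; ring_nf at h1; omega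
  rw [h1, h2, PySem.Int.floordiv_eq_ediv_of_pos (by omega), PySem.Int.floordiv_eq_ediv_of_pos (by omega)]
  omega

theorem count_1D_inv (nums : List Int) : ∀ (l t : Int),
    (nums.foldl (fun (st : Int × Int) n =>
        let l := if n ≠ 0 then st.1 + 1 else 0
        (l, st.2 + l)) (l, t)).2 = count_1D_altGo nums (t - pvTri l) l := by
  induction nums with
  | nil => intro l t; simp [count_1D_altGo, pvTri]
  | cons n rest ih =>
      intro l t
      by_cases hn : n = 0
      · subst hn
        simp only [List.foldl_cons, ne_eq, not_true_eq_false, if_false, add_zero]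
        rw [ih 0 t, count_1D_altGo, if_neg (by simp)]
        have h : t - pvTri 0 = t - pvTri l + PySem.Int.floordiv (l * (l + 1)) 2 := by
          rw [pvTri_zero]
          show t - 0 = t - pvTri l + pvTri l
          ring
        rw [h]
      · simp only [List.foldl_cons, ne_eq, hn, not_false_eq_true, if_pos]
        rw [ih (l + 1) (t + (l + 1)), count_1D_altGo, if_pos hn]
        have h : t + (l + 1) - pvTri (l + 1) = t - pvTri l := by
          rw [pvTri_succ]; ring
        rw [h]

-- ===== VERDICT (by name: the statement is the Claim_ definition above) =====
theorem count_1D_spec : Claim_equal_count_1D := by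
  intro nums _
  unfold Spec_count_1D count_1D count_1D_alt
  rw [count_1D_inv nums 0 0]
  simp [pvTri_zero]
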